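-- pv_equiv track=rewrite | github.com/DalavanCloud/regulations-xml-parser | regulation/changes.py | get_parent_label
-- ===== SOURCE A (Python) =====
-- def get_parent_label(label_parts):
--     """ Determine the parent label for the given label part list. """
--     parent_label = None
--
--     # It can't have a parent if it's only one part
--     if len(label_parts) <= 1:
--         return parent_label
--
--     # If it's the interps for the whole part, return the part
--     if len(label_parts) == 2:
--         return label_parts[:1]
--
--     # Not an interpretation label. This is easy.
--     parent_label = label_parts[0:-1]
--
--     if label_parts[-1] == 'Interp':
--         # It's the whole interp for the label. Get the parent and
--         # add Interp again.
--         parent_label = get_parent_label(parent_label)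
--         parent_label.append('Interp')
--
--     return parent_label
-- ===== SOURCE B (Python) =====
-- def get_parent_label(label_parts):
--     """ Determine the parent label for the given label part list. """
--     n = len(label_parts)
--     if n <= 1:
--         return None
--     if n == 2:
--         return label_parts[:1]
--     # Iteratively strip trailing 'Interp' markers instead of recursing.
--     cur = label_parts
--     count = 0
--     while len(cur) >= 3 and cur[-1] == 'Interp':
--         count += 1
--         cur = cur[:-1]
--     base = cur[:1] if len(cur) == 2 else cur[:-1]
--     return base + ['Interp'] * count
-- ===== Notes on version B (the rewrite author's own statement) =====
-- stated objective: alternative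
-- what changed: Replaced A's recursion (recurse on label_parts[:-1] and re-append 'Interp') by a single explicit loop that strips and counts trailing 'Interp' tokens, then builds base + ['Interp']*count in one step.
import Mathlib
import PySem

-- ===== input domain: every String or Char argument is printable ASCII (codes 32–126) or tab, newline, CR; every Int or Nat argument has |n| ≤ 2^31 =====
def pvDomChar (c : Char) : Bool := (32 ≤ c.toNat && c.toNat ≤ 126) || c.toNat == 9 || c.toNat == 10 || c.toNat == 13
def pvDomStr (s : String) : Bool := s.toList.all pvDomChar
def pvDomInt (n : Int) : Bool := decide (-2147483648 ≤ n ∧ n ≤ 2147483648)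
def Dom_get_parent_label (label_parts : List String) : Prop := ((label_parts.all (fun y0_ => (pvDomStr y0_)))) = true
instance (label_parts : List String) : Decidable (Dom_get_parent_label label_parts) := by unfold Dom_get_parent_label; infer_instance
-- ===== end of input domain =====

-- B replaces A's recursion by one explicit loop that counts trailing 'Interp' markers (objective: alternative decomposition).

-- slicing helper used by both ports to keep xs[:-1] readable; termination lemma for the recursions
theorem length_slice_init {α : Type} (l : List α) (h : 1 ≤ l.length) :
    (PySem.List.slice l (some 0) (some (-1))).length = l.length - 1 := by
  rcases l with _ | ⟨a, t⟩
  · simp at h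
  · simp [PySem.List.slice, PySem.List.clampIdx]
    split_ifs <;> simp
    omega

-- ===== PORT A =====
def get_parent_label (label_parts : List String) : Option (List String) :=
  -- if len(label_parts) <= 1: return None
  if label_parts.length ≤ 1 then none
  -- if len(label_parts) == 2: return label_parts[:1]
  else if label_parts.length = 2 then some (PySem.List.slice label_parts none (some 1))
  else
    -- parent_label = label_parts[0:-1]
    let parent := PySem.List.slice label_parts (some 0) (some (-1))
    -- if label_parts[-1] == 'Interp'
    if PySem.List.pyGet? label_parts (-1) = some "Interp" then
      match get_parent_label parent with
      -- parent_label.append('Interp')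
      | some p => some (p ++ ["Interp"])
      -- Python would raise AttributeError here; unreachable (the recursion is on a list of length ≥ 2)
      | none => none
    else some parent
termination_by label_parts.length
decreasing_by
  have : 1 ≤ label_parts.length := by omega
  rw [length_slice_init label_parts this]; omega

-- ===== PORT B =====
-- while len(cur) >= 3 and cur[-1] == 'Interp': count += 1; cur = cur[:-1]
def stripInterp (cur : List String) (count : Nat) : List String × Nat :=
  if 3 ≤ cur.length ∧ PySem.List.pyGet? cur (-1) = some "Interp" then
    stripInterp (PySem.List.slice cur (some 0) (some (-1))) (count + 1)
  else (cur, count)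
termination_by cur.length
decreasing_by
  rename_i h
  have : 1 ≤ cur.length := by omega
  rw [length_slice_init cur this]; omega

def get_parent_label_alt (label_parts : List String) : Option (List String) :=
  if label_parts.length ≤ 1 then none
  else if label_parts.length = 2 then some (PySem.List.slice label_parts none (some 1))
  else
    let sc := stripInterp label_parts 0
    let base := if sc.1.length = 2 then PySem.List.slice sc.1 none (some 1)
                else PySem.List.slice sc.1 (some 0) (some (-1))
    some (base ++ List.replicate sc.2 "Interp")

-- ===== PRECONDITION & SPEC =====
def Spec_get_parent_label (label_parts : List String) (out : Option (List String)) : Prop := out = get_parent_label_alt label_parts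
instance (label_parts : List String) (out : Option (List String)) : Decidable (Spec_get_parent_label label_parts out) := by unfold Spec_get_parent_label; infer_instance

-- ===== CLAIM (what is proved, stated in full; the proofs are below) =====
def Claim_equal_get_parent_label : Prop := ∀ (label_parts : List String), Dom_get_parent_label label_parts → Spec_get_parent_label label_parts (get_parent_label label_parts)

-- ===== LEMMAS AND PROOFS =====

-- the loop's counter is a pure accumulator
theorem stripInterp_acc : ∀ (n : Nat) (l : List String), l.length = n → ∀ (c : Nat),
    stripInterp l c = ((stripInterp l 0).1, (stripInterp l 0).2 + c) := by
  intro n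
  induction n using Nat.strong_induction_on with
  | _ n ih =>
    intro l hl c
    rw [stripInterp]
    conv_rhs => rw [stripInterp]
    split_ifs with h
    · have hlen : (PySem.List.slice l (some 0) (some (-1))).length = l.length - 1 :=
        length_slice_init l (by omega)
      rw [ih (l.length - 1) (by omega) _ (by omega) (c + 1),
          ih (l.length - 1) (by omega) _ (by omega) 1]
      simp [Prod.ext_iff]; omega
    · simp

-- peel one trailing 'Interp' off B
theorem alt_interp_step (l : List String) (h3 : 3 ≤ l.length)
    (hI : PySem.List.pyGet? l (-1) = some "Interp") :
    get_parent_label_alt l =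
      (get_parent_label_alt (PySem.List.slice l (some 0) (some (-1)))).map (· ++ ["Interp"]) := by
  have hlen : (PySem.List.slice l (some 0) (some (-1))).length = l.length - 1 :=
    length_slice_init l (by omega)
  set l' := PySem.List.slice l (some 0) (some (-1)) with hl'
  have hstrip : stripInterp l 0 = ((stripInterp l' 0).1, (stripInterp l' 0).2 + 1) := by
    rw [stripInterp]
    rw [if_pos ⟨h3, hI⟩]
    exact stripInterp_acc l'.length l' rfl 1
  unfold get_parent_label_alt
  rw [if_neg (by omega), if_neg (by omega), if_neg (by omega)]
  by_cases h2 : l'.length = 2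
  · have hstop : stripInterp l' 0 = (l', 0) := by
      rw [stripInterp, if_neg (by omega)]
    rw [if_pos h2, hstrip, hstop]
    simp [h2]
  · have h3' : 3 ≤ l'.length := by omega
    rw [if_neg (by omega), hstrip]
    rcases Decidable.em ((stripInterp l' 0).1.length = 2) with hc | hc <;>
      simp [hc, List.replicate_succ']

theorem AB_eq : ∀ (n : Nat) (l : List String), l.length = n →
    get_parent_label l = get_parent_label_alt l := by
  intro n
  induction n using Nat.strong_induction_on with
  | _ n ih =>
    intro l hl
    rw [get_parent_label]
    by_cases h1 : l.length ≤ 1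
    · rw [if_pos h1]
      unfold get_parent_label_alt
      rw [if_pos h1]
    by_cases h2 : l.length = 2
    · rw [if_neg h1, if_pos h2]
      unfold get_parent_label_alt
      rw [if_neg h1, if_pos h2]
    · have h3 : 3 ≤ l.length := by omega
      have hlen : (PySem.List.slice l (some 0) (some (-1))).length = l.length - 1 :=
        length_slice_init l (by omega)
      rw [if_neg h1, if_neg h2]
      by_cases hI : PySem.List.pyGet? l (-1) = some "Interp"
      · rw [alt_interp_step l h3 hI]
        simp only [if_pos hI]
        rw [ih (l.length - 1) (by omega) _ (by omega)]
        cases get_parent_label_alt (PySem.List.slice l (some 0) (some (-1))) <;> simp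
      · simp only [if_neg hI]
        unfold get_parent_label_alt
        rw [if_neg h1, if_neg h2]
        have hstop : stripInterp l 0 = (l, 0) := by
          rw [stripInterp, if_neg (by tauto)]
        rw [hstop]
        simp [if_neg h2]

-- ===== VERDICT (by name: the statement is the Claim_ definition above) =====
theorem get_parent_label_spec : Claim_equal_get_parent_label := by
  intro l _
  unfold Spec_get_parent_label
  exact AB_eq l.length l rfl
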